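-- pv_equiv track=rewrite | github.com/am17an/ProjectEuler | 788.py | is_dominating
-- ===== SOURCE A (Python) =====
-- def is_dominating(num):
--     s = str(num)
--     n = len(s)
--     cnt = [0]*10
--     for ch in s:
--         cnt[int(ch)] += 1
--     for d in range(10):
--         if cnt[d] > n//2:
--             return True
--     return False
-- ===== SOURCE B (Python) =====
-- def is_dominating(num):
--     # Boyer-Moore majority vote over the digits of str(num):
--     # track a candidate digit, then verify its count against n // 2.
--     s = str(num)
--     n = len(s)
--     candidate, count = 0, 0
--     for ch in s:
--         d = int(ch)
--         if count == 0:
--             candidate = d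
--         if d == candidate:
--             count += 1
--         else:
--             count -= 1
--     total = 0
--     for ch in s:
--         if int(ch) == candidate:
--             total += 1
--     return total > n // 2
-- ===== Notes on version B (the rewrite author's own statement) =====
-- stated objective: alternative
-- what changed: Replaced the digit-frequency table plus digit scan by the Boyer-Moore majority-vote algorithm: one pass tracks a candidate digit, a second pass verifies that its count is a strict majority.
import Mathlib
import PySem

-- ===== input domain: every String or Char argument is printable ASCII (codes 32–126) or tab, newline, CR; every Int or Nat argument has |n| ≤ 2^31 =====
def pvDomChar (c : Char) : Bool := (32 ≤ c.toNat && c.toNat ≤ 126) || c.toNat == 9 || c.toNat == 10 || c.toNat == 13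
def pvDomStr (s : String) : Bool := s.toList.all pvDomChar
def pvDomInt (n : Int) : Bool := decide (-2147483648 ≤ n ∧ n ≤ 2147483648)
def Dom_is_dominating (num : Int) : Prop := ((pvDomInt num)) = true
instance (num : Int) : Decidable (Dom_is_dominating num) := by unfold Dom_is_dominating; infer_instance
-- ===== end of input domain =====

-- B replaces A's 10-entry frequency table and 0..9 scan by the Boyer-Moore
-- majority-vote algorithm (candidate tracking plus a verification pass); objective: alternative.

-- int(ch) for a single character; exact where Python's int(ch) returns a value (digit characters —
-- Pre_ restricts to num ≥ 0, so every character of str(num) is a digit).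
def pyIntCh (ch : Char) : Int := (PySem.Int.ofChars? [ch]).getD 0

-- ===== PORT A =====
def is_dominating (num : Int) : Bool :=
  let s := PySem.Int.toChars num
  let n : Int := (s.length : Int)
  -- cnt[int(ch)] += 1 : the index is 0..9 on Pre_, so .toNat and List.set are exact there
  let cnt := s.foldl (fun cnt ch =>
    cnt.set (pyIntCh ch).toNat (cnt.getD (pyIntCh ch).toNat 0 + 1)) (List.replicate 10 (0 : Int))
  (List.range 10).any fun d => decide (cnt.getD d 0 > PySem.Int.floordiv n 2)

-- ===== PORT B =====
def is_dominating_alt (num : Int) : Bool :=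
  let s := PySem.Int.toChars num
  let n : Int := (s.length : Int)
  let st := s.foldl (fun (p : Int × Int) ch =>
    let d := pyIntCh ch
    let c := if p.2 == 0 then d else p.1
    if d == c then (c, p.2 + 1) else (c, p.2 - 1)) ((0 : Int), (0 : Int))
  let total := s.foldl (fun (t : Int) ch => if pyIntCh ch == st.1 then t + 1 else t) (0 : Int)
  decide (total > PySem.Int.floordiv n 2)

-- ===== PRECONDITION & SPEC =====
-- Pre_ excludes num < 0, where str(num) starts with '-' and int(ch) raises ValueError in A (and in B).
def Pre_is_dominating (num : Int) : Prop := 0 ≤ num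
instance (num : Int) : Decidable (Pre_is_dominating num) := by unfold Pre_is_dominating; infer_instance
def pvWitness_is_dominating : Int := (131)

def Spec_is_dominating (num : Int) (out : Bool) : Prop := out = is_dominating_alt num
instance (num : Int) (out : Bool) : Decidable (Spec_is_dominating num out) := by unfold Spec_is_dominating; infer_instance

-- ===== CLAIM (what is proved, stated in full; the proofs are below) =====
def Claim_equal_is_dominating : Prop := ∀ (num : Int), Dom_is_dominating num → Pre_is_dominating num → Spec_is_dominating num (is_dominating num)

-- ===== LEMMAS AND PROOFS =====

def digits10 : List Char := ['0','1','2','3','4','5','6','7','8','9']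

-- count (as Int) of characters of l whose digit value is d
def cntI (l : List Char) (d : Int) : Int := (l.countP (fun ch => pyIntCh ch == d) : Int)

theorem cntI_nil (d : Int) : cntI [] d = 0 := rfl

theorem cntI_cons (x : Char) (t : List Char) (d : Int) :
    cntI (x :: t) d = cntI t d + (if pyIntCh x = d then 1 else 0) := by
  simp only [cntI, List.countP_cons, beq_iff_eq]
  split_ifs <;> simp

set_option maxRecDepth 100000 in
theorem pyIntCh_val : pyIntCh '0' = 0 ∧ pyIntCh '1' = 1 ∧ pyIntCh '2' = 2 ∧ pyIntCh '3' = 3 ∧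
    pyIntCh '4' = 4 ∧ pyIntCh '5' = 5 ∧ pyIntCh '6' = 6 ∧ pyIntCh '7' = 7 ∧
    pyIntCh '8' = 8 ∧ pyIntCh '9' = 9 := by
  refine ⟨?_, ?_, ?_, ?_, ?_, ?_, ?_, ?_, ?_, ?_⟩ <;> rfl

theorem pyIntCh_digits : ∀ c ∈ digits10, 0 ≤ pyIntCh c ∧ pyIntCh c ≤ 9 := by
  obtain ⟨h0, h1, h2, h3, h4, h5, h6, h7, h8, h9⟩ := pyIntCh_val
  intro c hc
  fin_cases hc <;> simp only [h0, h1, h2, h3, h4, h5, h6, h7, h8, h9] <;> omega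

theorem toDigitsCore_digits (fuel n : Nat) (ds : List Char)
    (hds : ∀ c ∈ ds, c ∈ digits10) :
    ∀ c ∈ Nat.toDigitsCore 10 fuel n ds, c ∈ digits10 := by
  induction fuel generalizing n ds with
  | zero => simpa [Nat.toDigitsCore] using hds
  | succ f ih =>
    rw [Nat.toDigitsCore]
    have h10 : n % 10 < 10 := Nat.mod_lt _ (by norm_num)
    have hd : (n % 10).digitChar ∈ digits10 := by
      interval_cases h : n % 10 <;> decide
    have hcons : ∀ c ∈ (n % 10).digitChar :: ds, c ∈ digits10 := by
      intro c hc; rw [List.mem_cons] at hc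
      rcases hc with rfl | hc
      · exact hd
      · exact hds _ hc
    split
    · exact hcons
    · exact ih _ _ hcons

theorem toChars_digits (num : Int) (h : 0 ≤ num) :
    ∀ c ∈ PySem.Int.toChars num, c ∈ digits10 := by
  unfold PySem.Int.toChars
  rw [if_neg (by omega)]
  exact toDigitsCore_digits _ _ _ (by simp)

-- A's frequency table, characterised: entry d holds the number of characters of digit value d
theorem foldA_getD (l : List Char) (hl : ∀ ch ∈ l, 0 ≤ pyIntCh ch ∧ pyIntCh ch ≤ 9) :
    ∀ (cnt0 : List Int), cnt0.length = 10 → ∀ d : Nat, d < 10 →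
    (l.foldl (fun cnt ch =>
        cnt.set (pyIntCh ch).toNat (cnt.getD (pyIntCh ch).toNat 0 + 1)) cnt0).getD d 0
      = cnt0.getD d 0 + cntI l (d : Int) := by
  induction l with
  | nil => intro cnt0 _ d _; simp [cntI_nil]
  | cons x t ih =>
    intro cnt0 hlen d hd
    have hx := hl x (List.mem_cons_self)
    have ht : ∀ ch ∈ t, 0 ≤ pyIntCh ch ∧ pyIntCh ch ≤ 9 :=
      fun ch hch => hl ch (List.mem_cons_of_mem _ hch)
    have hlen' : (cnt0.set (pyIntCh x).toNat (cnt0.getD (pyIntCh x).toNat 0 + 1)).length = 10 := by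
      simp [hlen]
    rw [List.foldl_cons, ih ht _ hlen' d hd, cntI_cons]
    have hd' : d < cnt0.length := by omega
    have hset : d < (cnt0.set (pyIntCh x).toNat (cnt0.getD (pyIntCh x).toNat 0 + 1)).length := by
      omega
    rw [List.getD_eq_getElem _ _ hset, List.getD_eq_getElem _ _ hd', List.getElem_set]
    by_cases hxd : pyIntCh x = (d : Int)
    · have hnat : (pyIntCh x).toNat = d := by omega
      rw [if_pos hnat, if_pos hxd, hnat, List.getD_eq_getElem _ _ hd']
      ring
    · have hnat : (pyIntCh x).toNat ≠ d := by omega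
      rw [if_neg hnat, if_neg hxd]
      ring

-- Boyer-Moore step, named for the proofs (definitionally the fold body of the B port)
def bmStep (p : Int × Int) (ch : Char) : Int × Int :=
  let d := pyIntCh ch
  let c := if p.2 == 0 then d else p.1
  if d == c then (c, p.2 + 1) else (c, p.2 - 1)

-- the final candidate is the initial one or the digit value of some scanned character
theorem bm_candidate (l : List Char) : ∀ p : Int × Int,
    (l.foldl bmStep p).1 = p.1 ∨ ∃ ch ∈ l, (l.foldl bmStep p).1 = pyIntCh ch := by
  induction l with
  | nil => intro p; left; rfl
  | cons x t ih =>
    intro p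
    rw [List.foldl_cons]
    have hstep : (bmStep p x).1 = p.1 ∨ (bmStep p x).1 = pyIntCh x := by
      simp only [bmStep]
      split_ifs <;> simp_all
    rcases ih (bmStep p x) with h | ⟨ch, hch, h⟩
    · rw [h]
      rcases hstep with h' | h'
      · left; exact h'
      · right; exact ⟨x, List.mem_cons_self, h'⟩
    · right; exact ⟨ch, List.mem_cons_of_mem _ hch, h⟩

-- Boyer-Moore invariant: after the scan, any value other than the candidate occurs
-- at most ((length) + k0 - k)/2 times (counting the k0 credits of the initial candidate)
theorem bm_inv (l : List Char) : ∀ p : Int × Int, 0 ≤ p.2 →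
    0 ≤ (l.foldl bmStep p).2 ∧
    ∀ d : Int, d ≠ (l.foldl bmStep p).1 →
      2 * (cntI l d + (if d = p.1 then p.2 else 0))
        ≤ (l.length : Int) + p.2 - (l.foldl bmStep p).2 := by
  induction l with
  | nil =>
    intro p hp
    refine ⟨hp, ?_⟩
    intro d hd
    simp only [List.foldl_nil] at hd ⊢
    rw [if_neg hd, cntI_nil]
    simp
  | cons x t ih =>
    intro p hp
    rw [List.foldl_cons]
    by_cases hk : p.2 = 0
    · have hqv : bmStep p x = (pyIntCh x, p.2 + 1) := by
        simp [bmStep, hk]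
      rw [hqv]
      obtain ⟨ihk, ihd⟩ := ih (pyIntCh x, p.2 + 1) (by dsimp; omega)
      refine ⟨ihk, ?_⟩
      intro d hd
      have h2 := ihd d hd
      dsimp only at h2
      simp only [List.length_cons] at h2 ⊢
      rw [cntI_cons]
      push_cast at h2 ⊢
      split_ifs at h2 ⊢ <;> omega
    · by_cases hx : pyIntCh x = p.1
      · have hqv : bmStep p x = (p.1, p.2 + 1) := by
          simp [bmStep, hk, hx]
        rw [hqv]
        obtain ⟨ihk, ihd⟩ := ih (p.1, p.2 + 1) (by dsimp; omega)
        refine ⟨ihk, ?_⟩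
        intro d hd
        have h2 := ihd d hd
        dsimp only at h2
        simp only [List.length_cons] at h2 ⊢
        rw [cntI_cons]
        push_cast at h2 ⊢
        split_ifs at h2 ⊢ <;> omega
      · have hqv : bmStep p x = (p.1, p.2 - 1) := by
          simp [bmStep, hk, hx]
        rw [hqv]
        obtain ⟨ihk, ihd⟩ := ih (p.1, p.2 - 1) (by dsimp; omega)
        refine ⟨ihk, ?_⟩
        intro d hd
        have h2 := ihd d hd
        dsimp only at h2
        simp only [List.length_cons] at h2 ⊢
        rw [cntI_cons]
        push_cast at h2 ⊢
        split_ifs at h2 ⊢ <;> omega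

-- ===== VERDICT (by name: the statement is the Claim_ definition above) =====
theorem is_dominating_spec : Claim_equal_is_dominating := by
  intro num _ hpre
  unfold Spec_is_dominating is_dominating is_dominating_alt
  dsimp only
  set l := PySem.Int.toChars num with hl
  have hdig : ∀ ch ∈ l, 0 ≤ pyIntCh ch ∧ pyIntCh ch ≤ 9 :=
    fun ch hch => pyIntCh_digits ch (toChars_digits num hpre ch hch)
  set fd := PySem.Int.floordiv (l.length : Int) 2 with hfd
  have hfd2 : fd = (l.length : Int) / 2 := PySem.Int.floordiv_eq_ediv_of_pos (by norm_num)
  -- B's pieces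
  have hfoldB : l.foldl (fun (p : Int × Int) ch =>
      let d := pyIntCh ch
      let c := if p.2 == 0 then d else p.1
      if d == c then (c, p.2 + 1) else (c, p.2 - 1)) ((0 : Int), (0 : Int))
      = l.foldl bmStep ((0 : Int), (0 : Int)) := rfl
  rw [hfoldB]
  set st := l.foldl bmStep ((0 : Int), (0 : Int)) with hst
  have hB : l.foldl (fun (t : Int) ch => if pyIntCh ch == st.1 then t + 1 else t) (0 : Int)
      = cntI l st.1 := by
    rw [PySem.List.foldl_count_if (fun ch => pyIntCh ch == st.1) l 0, cntI]
    ring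
  rw [hB]
  -- A's pieces
  have hA : ∀ d : Nat, d < 10 →
      (l.foldl (fun cnt ch =>
        cnt.set (pyIntCh ch).toNat (cnt.getD (pyIntCh ch).toNat 0 + 1))
        (List.replicate 10 (0 : Int))).getD d 0 = cntI l (d : Int) := by
    intro d hd
    rw [foldA_getD l hdig _ (by simp) d hd,
      List.getD_eq_getElem _ _ (by simpa using hd), List.getElem_replicate]
    ring
  obtain ⟨hk0, hinv⟩ := bm_inv l ((0 : Int), (0 : Int)) le_rfl
  rw [← hst] at hk0 hinv
  -- the invariant specialised to the start state (0, 0)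
  have hinv' : ∀ d : Int, d ≠ st.1 → 2 * cntI l d ≤ (l.length : Int) - st.2 := by
    intro d hd
    have := hinv d hd
    split_ifs at this <;> omega
  -- candidate bounds
  have hcand : 0 ≤ st.1 ∧ st.1 ≤ 9 := by
    rcases bm_candidate l ((0 : Int), (0 : Int)) with h | ⟨ch, hch, h⟩
    · rw [← hst] at h; rw [h]; omega
    · rw [← hst] at h; rw [h]; exact hdig ch hch
  rw [Bool.eq_iff_iff]
  simp only [List.any_eq_true, List.mem_range, decide_eq_true_eq]
  constructor
  · rintro ⟨d, hd10, hgt⟩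
    rw [hA d hd10] at hgt
    by_cases hdc : (d : Int) = st.1
    · rwa [hdc] at hgt
    · exfalso
      have h2 := hinv' _ hdc
      rw [hfd2] at hgt
      omega
  · intro hgt
    refine ⟨st.1.toNat, by omega, ?_⟩
    rw [hA st.1.toNat (by omega)]
    have : ((st.1.toNat : Nat) : Int) = st.1 := by omega
    rwa [this]
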